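-- pv_equiv track=rewrite | github.com/thenriique/project-sudoku | sudoku.py | firstVertice
-- ===== SOURCE A (Python) =====
-- def firstVertice(sudoku):
--     i1 = 0
--     i2 = 0
--
--     for row in sudoku:
--         for column in row:
--             if column == 0:
--                 return (i1, i2)
--
--             if i2 == 8 :
--                 i1 = i1 + 1
--                 i2 = 0
--             else:
--                 i2 = i2 + 1
-- ===== SOURCE B (Python) =====
-- def firstVertice(sudoku):
--     zeros = [k for k, cell in enumerate(c for row in sudoku for c in row) if cell == 0]
--     if zeros:
--         return divmod(min(zeros), 9)
-- ===== Notes on version B (the rewrite author's own statement) =====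
-- stated objective: alternative
-- what changed: Instead of a first-hit scan with hand-wrapped row/column counters, B stages the work: it collects the flattened indices of ALL zero cells in one comprehension, then takes the minimum of that index list and converts it to coordinates with a closed-form divmod(k, 9).
import Mathlib
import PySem

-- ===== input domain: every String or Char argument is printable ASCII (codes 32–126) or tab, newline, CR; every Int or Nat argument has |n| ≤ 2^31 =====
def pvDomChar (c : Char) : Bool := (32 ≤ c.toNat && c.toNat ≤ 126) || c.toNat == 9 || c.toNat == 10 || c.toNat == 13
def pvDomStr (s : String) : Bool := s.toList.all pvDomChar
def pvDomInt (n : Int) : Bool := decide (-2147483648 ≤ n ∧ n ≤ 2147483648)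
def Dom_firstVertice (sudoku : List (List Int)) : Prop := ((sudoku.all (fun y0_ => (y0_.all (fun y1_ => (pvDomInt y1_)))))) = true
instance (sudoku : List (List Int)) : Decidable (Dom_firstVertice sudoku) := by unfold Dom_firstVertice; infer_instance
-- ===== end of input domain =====

-- B stages the work differently: it collects the flattened indices of ALL zero
-- cells, then takes the minimum of that list and converts it with divmod(k, 9),
-- instead of A's early-exit scan with hand-wrapped row/column counters (alternative).


-- ===== PORT A =====
-- inner 'for column in row' loop: either a zero is found (.inl result) or the
-- loop ends with the updated counter state (.inr (i1, i2))
def fvCells (i1 i2 : Int) : List Int → ((Int × Int) ⊕ (Int × Int))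
  | [] => .inr (i1, i2)
  | c :: rest =>
    if c = 0 then .inl (i1, i2)
    else if i2 = 8 then fvCells (i1 + 1) 0 rest
    else fvCells i1 (i2 + 1) rest

-- outer 'for row in sudoku' loop threading (i1, i2)
def fvRows (i1 i2 : Int) : List (List Int) → Option (Int × Int)
  | [] => none
  | r :: rs =>
    match fvCells i1 i2 r with
    | .inl p => some p
    | .inr (a, b) => fvRows a b rs

def firstVertice (sudoku : List (List Int)) : Option (Int × Int) :=
  fvRows 0 0 sudoku

-- ===== PORT B =====
-- zeros = [k for k, cell in enumerate(c for row in sudoku for c in row) if cell == 0];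
-- 'if zeros: return divmod(min(zeros), 9)' — min(zeros) exists iff zeros ≠ [],
-- which is exactly the some-case of PySem.List.min?; falling off the end is None
def firstVertice_alt (sudoku : List (List Int)) : Option (Int × Int) :=
  let zeros := ((PySem.List.enumerate sudoku.flatten 0).filter (fun p => p.2 == 0)).map (·.1)
  match PySem.List.min? zeros (fun x => x) with
  | some m => some (PySem.Int.floordiv m 9, PySem.Int.mod m 9)
  | none => none

-- ===== PRECONDITION & SPEC =====
def Spec_firstVertice (sudoku : List (List Int)) (out : Option (Int × Int)) : Prop := out = firstVertice_alt sudoku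
instance (sudoku : List (List Int)) (out : Option (Int × Int)) : Decidable (Spec_firstVertice sudoku out) := by unfold Spec_firstVertice; infer_instance

-- ===== CLAIM (what is proved, stated in full; the proofs are below) =====
def Claim_equal_firstVertice : Prop := ∀ (sudoku : List (List Int)), Dom_firstVertice sudoku → Spec_firstVertice sudoku (firstVertice sudoku)

-- ===== LEMMAS AND PROOFS =====

-- proof-side bridge: a direct first-zero scan over the flattened list
def fvScan (k : Nat) : List Int → Option (Int × Int)
  | [] => none
  | c :: rest =>
    if c = 0 then some ((k / 9 : Nat), (k % 9 : Nat))
    else fvScan (k + 1) rest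

-- A's inner loop started at state (k/9, k%9) behaves like the bridge scan from index k
lemma fvCells_eq (row : List Int) (k : Nat) :
    fvCells ((k / 9 : Nat)) ((k % 9 : Nat)) row =
      match fvScan k row with
      | some p => .inl p
      | none => .inr (((k + row.length) / 9 : Nat), ((k + row.length) % 9 : Nat)) := by
  induction row generalizing k with
  | nil => simp [fvCells, fvScan]
  | cons c rest ih =>
    rw [show k + (c :: rest).length = (k + 1) + rest.length from by simp; omega]
    simp only [fvCells, fvScan]
    by_cases hc : c = 0
    · simp [hc]
    · rw [if_neg hc, if_neg hc]
      by_cases h8 : k % 9 = 8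
      · rw [if_pos (show ((k % 9 : Nat) : Int) = 8 by exact_mod_cast h8),
            show ((k / 9 : Nat) : Int) + 1 = (((k + 1) / 9 : Nat) : Int) by
              rw [show (k + 1) / 9 = k / 9 + 1 from by omega]; push_cast; ring,
            show (0 : Int) = (((k + 1) % 9 : Nat) : Int) by
              rw [show (k + 1) % 9 = 0 from by omega]; simp]
        exact ih (k + 1)
      · rw [if_neg (show ¬ ((k % 9 : Nat) : Int) = 8 by exact_mod_cast h8),
            show ((k / 9 : Nat) : Int) = (((k + 1) / 9 : Nat) : Int) by
              rw [show (k + 1) / 9 = k / 9 from by omega],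
            show ((k % 9 : Nat) : Int) + 1 = (((k + 1) % 9 : Nat) : Int) by
              rw [show (k + 1) % 9 = k % 9 + 1 from by omega]; push_cast; ring]
        exact ih (k + 1)

-- the bridge scan splits over list append
lemma fvScan_append (xs ys : List Int) (k : Nat) :
    fvScan k (xs ++ ys) =
      match fvScan k xs with
      | some p => some p
      | none => fvScan (k + xs.length) ys := by
  induction xs generalizing k with
  | nil => simp [fvScan]
  | cons c rest ih =>
    rw [show k + (c :: rest).length = (k + 1) + rest.length from by simp; omega]
    simp only [List.cons_append, fvScan]
    by_cases hc : c = 0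
    · simp [hc]
    · rw [if_neg hc, if_neg hc, ih (k + 1)]

-- A's outer loop started at state (k/9, k%9) equals the bridge scan of the flattened tail
lemma fvRows_eq (rs : List (List Int)) (k : Nat) :
    fvRows ((k / 9 : Nat)) ((k % 9 : Nat)) rs = fvScan k rs.flatten := by
  induction rs generalizing k with
  | nil => simp [fvRows, fvScan]
  | cons r rest ih =>
    simp only [fvRows, List.flatten_cons, fvCells_eq r k, fvScan_append r rest.flatten k]
    cases h : fvScan k r with
    | some p => rfl
    | none =>
      show fvRows (((k + r.length) / 9 : Nat)) (((k + r.length) % 9 : Nat)) rest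
            = fvScan (k + r.length) rest.flatten
      exact ih (k + r.length)

-- folding min over a list that is ≥ the seed returns the seed
lemma foldl_min_eq (t : List Int) (x : Int) (h : ∀ y ∈ t, x ≤ y) :
    t.foldl min x = x := by
  induction t generalizing x with
  | nil => rfl
  | cons a t ih =>
    simp only [List.foldl_cons]
    rw [min_eq_left (h a (by simp))]
    exact ih x (fun y hy => h y (by simp [hy]))

-- on a strictly increasing list, Python's min is the head
lemma min?_of_pairwise (l : List Int) (h : l.Pairwise (· < ·)) :
    PySem.List.min? l (fun x => x) = l.head? := by
  cases l with
  | nil => simp [PySem.List.min?_eq_none_iff]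
  | cons x t =>
    rw [PySem.List.min?_id_cons]
    rw [foldl_min_eq t x (fun y hy => le_of_lt ((List.pairwise_cons.mp h).1 y hy))]
    rfl

-- the bridge scan from k equals head-of-zero-indices of 'enumerate xs k', in divmod form
lemma fvScan_eq_enum (xs : List Int) (k : Nat) :
    fvScan k xs =
      match (((PySem.List.enumerate xs (k : Int)).filter (fun p => p.2 == 0)).map (·.1)).head? with
      | some m => some (PySem.Int.floordiv m 9, PySem.Int.mod m 9)
      | none => none := by
  induction xs generalizing k with
  | nil => simp [fvScan, PySem.List.enumerate_nil]
  | cons c rest ih =>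
    simp only [fvScan, PySem.List.enumerate_cons, List.filter_cons]
    by_cases hc : c = 0
    · rw [if_pos hc, if_pos (show (c == (0 : Int)) = true by simp [hc])]
      simp only [List.map_cons, List.head?_cons]
      rw [show PySem.Int.floordiv (k : Int) 9 = ((k / 9 : Nat) : Int) by
            simp [PySem.Int.floordiv, Int.fdiv_eq_ediv],
          show PySem.Int.mod (k : Int) 9 = ((k % 9 : Nat) : Int) by
            simp [PySem.Int.mod, Int.fmod_eq_emod]]
    · rw [if_neg hc]
      have : ((c == (0 : Int)) = false) := by simp [hc]
      simp only [this, Bool.false_eq_true, if_false]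
      have := ih (k + 1)
      rw [show ((k : Int) + 1) = ((k + 1 : Nat) : Int) by push_cast; ring]
      exact this

-- zeros index list is strictly increasing
lemma zeros_pairwise (xs : List Int) (s : Int) :
    (((PySem.List.enumerate xs s).filter (fun p => p.2 == 0)).map (·.1)).Pairwise (· < ·) := by
  apply List.Pairwise.map
  · exact fun a b h => h
  · exact (PySem.List.pairwise_lt_enumerate xs s).filter _

-- ===== VERDICT (by name: the statement is the Claim_ definition above) =====
theorem firstVertice_spec : Claim_equal_firstVertice := by
  intro sudoku _
  unfold Spec_firstVertice firstVertice firstVertice_alt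
  dsimp only
  rw [min?_of_pairwise _ (zeros_pairwise sudoku.flatten 0)]
  have h0 := fvRows_eq sudoku 0
  simp only [show (0:Nat)/9 = 0 from rfl, show (0:Nat)%9 = 0 from rfl, Nat.cast_zero] at h0
  rw [h0, fvScan_eq_enum sudoku.flatten 0]
  rfl
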